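-- pv_equiv track=rewrite | github.com/wlmoi/TTSKY26A-NN | test/test.py | make_density_pattern
-- ===== SOURCE A (Python) =====
-- WINDOW = 256
--
-- def make_density_pattern(ones_count, length=WINDOW):
--     ones_count = max(0, min(length, int(ones_count)))
--     accumulator = 0
--     bits = []
--     for _ in range(length):
--         accumulator += ones_count
--         if accumulator >= length:
--             bits.append(1)
--             accumulator -= length
--         else:
--             bits.append(0)
--     return bits
-- ===== SOURCE B (Python) =====
-- WINDOW = 256
--
-- def make_density_pattern(ones_count, length=WINDOW):
--     ones_count = max(0, min(length, int(ones_count)))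
--     return [((i + 1) * ones_count) // length - (i * ones_count) // length
--             for i in range(length)]
-- ===== Notes on version B (the rewrite author's own statement) =====
-- stated objective: simpler
-- what changed: Replaces the running Bresenham accumulator threaded through the loop by a stateless comprehension computing each bit as the closed-form floor difference ((i+1)*k)//n - (i*k)//n.
import Mathlib
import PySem

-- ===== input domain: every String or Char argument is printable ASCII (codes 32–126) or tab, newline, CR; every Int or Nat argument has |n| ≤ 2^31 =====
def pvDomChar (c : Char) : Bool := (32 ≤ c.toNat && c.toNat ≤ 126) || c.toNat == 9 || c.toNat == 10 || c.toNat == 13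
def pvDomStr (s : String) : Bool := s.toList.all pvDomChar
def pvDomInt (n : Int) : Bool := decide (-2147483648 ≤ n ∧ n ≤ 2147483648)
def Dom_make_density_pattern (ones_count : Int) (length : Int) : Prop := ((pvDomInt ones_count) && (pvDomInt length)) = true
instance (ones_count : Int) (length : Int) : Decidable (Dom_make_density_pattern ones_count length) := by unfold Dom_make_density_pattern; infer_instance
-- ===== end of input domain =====

-- B replaces A's running accumulator loop by a stateless closed-form comprehension (objective: simpler).

-- ===== PORT A =====
def make_density_pattern (ones_count : Int) (length : Int) : List Int :=
  let oc := max 0 (min length ones_count)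
  ((PySem.List.pyRange 0 length 1).foldl
    (fun (s : Int × List Int) _ =>
      let acc := s.1 + oc
      if length ≤ acc then (acc - length, s.2 ++ [1]) else (acc, s.2 ++ [0]))
    (0, [])).2

-- ===== PORT B =====
def make_density_pattern_alt (ones_count : Int) (length : Int) : List Int :=
  let oc := max 0 (min length ones_count)
  (PySem.List.pyRange 0 length 1).map
    (fun i => PySem.Int.floordiv ((i + 1) * oc) length - PySem.Int.floordiv (i * oc) length)

-- ===== PRECONDITION & SPEC =====
def Spec_make_density_pattern (ones_count : Int) (length : Int) (out : List Int) : Prop := out = make_density_pattern_alt ones_count length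
instance (ones_count : Int) (length : Int) (out : List Int) : Decidable (Spec_make_density_pattern ones_count length out) := by unfold Spec_make_density_pattern; infer_instance

-- ===== CLAIM (what is proved, stated in full; the proofs are below) =====
def Claim_equal_make_density_pattern : Prop := ∀ (ones_count : Int) (length : Int), Dom_make_density_pattern ones_count length → Spec_make_density_pattern ones_count length (make_density_pattern ones_count length)

-- ===== LEMMAS AND PROOFS =====

-- one Bresenham step: division and remainder of r + oc by L, for 0 ≤ r < L and 0 ≤ oc ≤ L
theorem pv_step (L r oc : Int) (hr0 : 0 ≤ r) (hrL : r < L) (h0 : 0 ≤ oc) (h1 : oc ≤ L) :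
    (r + oc) / L = (if L ≤ r + oc then 1 else 0) ∧
    (r + oc) % L = (if L ≤ r + oc then r + oc - L else r + oc) := by
  have hL : 0 < L := lt_of_le_of_lt hr0 hrL
  by_cases h : L ≤ r + oc
  · have e : r + oc = (r + oc - L) + 1 * L := by ring
    constructor
    · rw [if_pos h, e, Int.add_mul_ediv_right _ _ (ne_of_gt hL),
        Int.ediv_eq_zero_of_lt (by omega) (by omega)]; ring
    · rw [if_pos h, e, Int.add_mul_emod_self_right, Int.emod_eq_of_lt (by omega) (by omega)]; ring
  · exact ⟨by rw [if_neg h, Int.ediv_eq_zero_of_lt (by omega) (by omega)],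
      by rw [if_neg h, Int.emod_eq_of_lt (by omega) (by omega)]⟩

-- loop invariant: after n iterations the accumulator is (n*oc) % L and the bits are the closed forms
theorem pv_inv (oc L : Int) (hL : 0 < L) (h0 : 0 ≤ oc) (h1 : oc ≤ L) :
    ∀ n : Nat, (n : Int) ≤ L →
      (PySem.List.pyRange 0 n 1).foldl
        (fun (s : Int × List Int) _ =>
          let acc := s.1 + oc
          if L ≤ acc then (acc - L, s.2 ++ [1]) else (acc, s.2 ++ [0]))
        (0, []) =
      (((n : Int) * oc) % L,
       (PySem.List.pyRange 0 n 1).map (fun i => ((i + 1) * oc) / L - (i * oc) / L)) := by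
  intro n
  induction n with
  | zero =>
    intro _
    simp [PySem.List.pyRange_one_eq_nil (le_refl 0)]
  | succ m ih =>
    intro hle
    have hm : (m : Int) ≤ L := by push_cast at hle ⊢; omega
    have hrange : PySem.List.pyRange 0 ((m : Int) + 1) 1 =
        PySem.List.pyRange 0 (m : Int) 1 ++ [(m : Int)] :=
      PySem.List.pyRange_one_succ_right (by positivity)
    have hr0 : 0 ≤ ((m : Int) * oc) % L := Int.emod_nonneg _ (ne_of_gt hL)
    have hrL : ((m : Int) * oc) % L < L := Int.emod_lt_of_pos _ hL
    obtain ⟨hdiv, hmod⟩ := pv_step L (((m : Int) * oc) % L) oc hr0 hrL h0 h1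
    have hsplit : (m : Int) * oc = L * ((m : Int) * oc / L) + ((m : Int) * oc) % L :=
      (Int.mul_ediv_add_emod _ _).symm
    push_cast
    rw [hrange, List.foldl_append, List.map_append, ih hm]
    simp only [List.foldl_cons, List.foldl_nil, List.map_cons, List.map_nil]
    -- rewrite the appended bit's closed form through the split of m*oc
    have hb : ((m : Int) + 1) * oc / L - (m : Int) * oc / L
        = (if L ≤ ((m : Int) * oc) % L + oc then 1 else 0) := by
      have e : ((m : Int) + 1) * oc = (((m : Int) * oc) % L + oc) + ((m : Int) * oc / L) * L := by
        nlinarith [hsplit]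
      rw [e, Int.add_mul_ediv_right _ _ (ne_of_gt hL), hdiv]
      omega
    have ha : ((m : Int) + 1) * oc % L
        = (if L ≤ ((m : Int) * oc) % L + oc then ((m : Int) * oc) % L + oc - L
           else ((m : Int) * oc) % L + oc) := by
      have e : ((m : Int) + 1) * oc = (((m : Int) * oc) % L + oc) + ((m : Int) * oc / L) * L := by
        nlinarith [hsplit]
      rw [e, Int.add_mul_emod_self_right, hmod]
    by_cases h : L ≤ ((m : Int) * oc) % L + oc
    · simp only [if_pos h, ha, hb]
    · simp only [if_neg h, ha, hb]

-- ===== VERDICT (by name: the statement is the Claim_ definition above) =====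
theorem make_density_pattern_spec : Claim_equal_make_density_pattern := by
  intro ones_count length _
  unfold Spec_make_density_pattern make_density_pattern make_density_pattern_alt
  by_cases hL : 0 < length
  · have h0 : 0 ≤ max 0 (min length ones_count) := le_max_left _ _
    have h1 : max 0 (min length ones_count) ≤ length := by
      apply max_le (le_of_lt hL) (min_le_left _ _)
    have hn : ((length.toNat : Int)) = length := Int.toNat_of_nonneg (le_of_lt hL)
    have := pv_inv (max 0 (min length ones_count)) length hL h0 h1 length.toNat (by omega)
    rw [hn] at this
    simp only [this]
    apply List.map_congr_left
    intro i hi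
    rw [PySem.Int.floordiv_eq_ediv_of_pos hL, PySem.Int.floordiv_eq_ediv_of_pos hL]
  · rw [PySem.List.pyRange_one_eq_nil (by omega)]
    simp
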